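-- pv_equiv track=rewrite | github.com/houxizhu/python | leetcode/easy/3637.py | leetcode
-- ===== SOURCE A (Python) =====
-- from typing import List
--
-- def leetcode(nums: List[int]) -> bool:
--     ll = len(nums)
--     if nums[1] <= nums[0]:
--         return False
--     if nums[-1] <= nums[-2]:
--         return False
--
--     point1_flag = 0
--     point2_flag = 0
--
--     for ii in range(2, ll-1):
--         if nums[ii] == nums[ii-1]:
--             return False
--         if point1_flag == 0:
--             if nums[ii] < nums[ii-1]:
--                 point1_flag = 1
--         else:
--             if point2_flag == 0:
--                 if nums[ii] > nums[ii-1]: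
--                     point2_flag = 1
--             else:
--                 if nums[ii] < nums[ii-1]:
--                     return False
--     if point1_flag == 0:
--         return False
--
--     return True
-- ===== SOURCE B (Python) =====
-- from typing import List
--
-- def leetcode(nums: List[int]) -> bool:
--     # collapse the sign sequence of consecutive differences into runs and
--     # compare against the literal pattern [up, down, up]
--     signs = []
--     for i in range(1, len(nums)):
--         d = nums[i] - nums[i - 1]
--         if d == 0:
--             return False
--         s = d > 0
--         if not signs or signs[-1] != s:
--             signs.append(s)
--     return signs == [True, False, True]
-- ===== Notes on version B (the rewrite author's own statement) =====
-- stated objective: idiomatic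
-- what changed: A tracks the up-down-up pattern with two mutable flag variables and special-cased boundary element checks; B computes the consecutive differences, collapses their signs into runs, and compares the run list against the literal pattern [up, down, up].
-- outside the precondition, e.g. on leetcode([1]): A raises IndexError, B returns False; on leetcode([]): A raises IndexError, B returns False; on leetcode([-2]): A raises IndexError, B returns False
import Mathlib
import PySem

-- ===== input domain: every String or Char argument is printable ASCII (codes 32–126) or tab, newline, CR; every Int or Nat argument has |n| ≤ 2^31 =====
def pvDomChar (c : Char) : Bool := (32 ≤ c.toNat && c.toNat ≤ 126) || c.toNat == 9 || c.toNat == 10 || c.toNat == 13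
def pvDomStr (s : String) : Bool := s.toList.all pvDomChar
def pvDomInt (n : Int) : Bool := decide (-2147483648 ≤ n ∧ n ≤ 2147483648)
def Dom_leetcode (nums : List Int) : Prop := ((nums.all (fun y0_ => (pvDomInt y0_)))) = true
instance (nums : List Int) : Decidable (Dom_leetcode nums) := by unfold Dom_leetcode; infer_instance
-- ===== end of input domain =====

-- B replaces A's flag machine by collapsing the difference signs into runs and comparing
-- with the literal pattern [up, down, up] (objective: simpler; return value only).

-- ===== PORT A =====
-- nums[i] under Pre_ (all indices in range); default never used inside Pre_
def pvAget (nums : List Int) (i : Int) : Int := PySem.List.pyGetD nums i 0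

def leetcodeLoop (nums : List Int) : List Int → Int → Int → Bool
  | [], p1, _p2 => if p1 = 0 then false else true
  | ii :: rest, p1, p2 =>
    if pvAget nums ii = pvAget nums (ii - 1) then false
    else if p1 = 0 then
      if pvAget nums ii < pvAget nums (ii - 1) then leetcodeLoop nums rest 1 p2
      else leetcodeLoop nums rest p1 p2
    else if p2 = 0 then
      if pvAget nums (ii - 1) < pvAget nums ii then leetcodeLoop nums rest p1 1
      else leetcodeLoop nums rest p1 p2
    else if pvAget nums ii < pvAget nums (ii - 1) then false
    else leetcodeLoop nums rest p1 p2

def leetcode (nums : List Int) : Bool :=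
  let ll : Int := nums.length
  if pvAget nums 1 ≤ pvAget nums 0 then false
  else if pvAget nums (-1) ≤ pvAget nums (-2) then false
  else leetcodeLoop nums (PySem.List.pyRange 2 (ll - 1) 1) 0 0

-- ===== PORT B =====
-- 'if not signs or signs[-1] != s' is ported as one getLast? comparison (none ≠ some s covers the empty case)
def leetcodeAltLoop (nums : List Int) : List Int → List Bool → Option (List Bool)
  | [], signs => some signs
  | i :: rest, signs =>
    let d := pvAget nums i - pvAget nums (i - 1)
    if d = 0 then none
    else
      let s : Bool := decide (0 < d)
      if signs.getLast? ≠ some s then leetcodeAltLoop nums rest (signs ++ [s])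
      else leetcodeAltLoop nums rest signs

def leetcode_alt (nums : List Int) : Bool :=
  match leetcodeAltLoop nums (PySem.List.pyRange 1 (nums.length : Int) 1) [] with
  | none => false
  | some signs => signs == [true, false, true]

-- ===== PRECONDITION & SPEC =====
-- Pre_ excludes exactly the lists of length < 2, on which A raises IndexError at nums[1]/nums[-2]
def Pre_leetcode (nums : List Int) : Prop := 2 ≤ nums.length
instance (nums : List Int) : Decidable (Pre_leetcode nums) := by unfold Pre_leetcode; infer_instance
def pvWitness_leetcode : List Int := [1, 3, 2, 4]

def Spec_leetcode (nums : List Int) (out : Bool) : Prop := out = leetcode_alt nums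
instance (nums : List Int) (out : Bool) : Decidable (Spec_leetcode nums out) := by unfold Spec_leetcode; infer_instance

-- ===== CLAIM (what is proved, stated in full; the proofs are below) =====
def Claim_equal_leetcode : Prop := ∀ (nums : List Int), Dom_leetcode nums → Pre_leetcode nums → Spec_leetcode nums (leetcode nums)
-- ===== LEMMAS AND PROOFS =====

-- A's flag machine over the list of consecutive differences
def mach : List Int → Int → Int → Bool
  | [], p1, _p2 => if p1 = 0 then false else true
  | d :: ds, p1, p2 =>
    if d = 0 then false
    else if p1 = 0 then
      if d < 0 then mach ds 1 p2 else mach ds p1 p2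
    else if p2 = 0 then
      if 0 < d then mach ds p1 1 else mach ds p1 p2
    else if d < 0 then false else mach ds p1 p2

-- B's run collapse over the list of consecutive differences
def coll : List Int → List Bool → Option (List Bool)
  | [], signs => some signs
  | d :: ds, signs =>
    if d = 0 then none
    else
      let s : Bool := decide (0 < d)
      if signs.getLast? ≠ some s then coll ds (signs ++ [s]) else coll ds signs

def res : Option (List Bool) → Bool
  | none => false
  | some signs => signs == [true, false, true]

lemma loopA_eq (nums : List Int) (idxs : List Int) (p1 p2 : Int) :
    leetcodeLoop nums idxs p1 p2 =
      mach (idxs.map (fun i => pvAget nums i - pvAget nums (i - 1))) p1 p2 := by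
  induction idxs generalizing p1 p2 with
  | nil => rfl
  | cons ii rest ih =>
    simp only [List.map_cons, leetcodeLoop, mach]
    split_ifs <;> first | exact ih _ _ | rfl | omega

lemma loopB_eq (nums : List Int) (idxs : List Int) (signs : List Bool) :
    leetcodeAltLoop nums idxs signs =
      coll (idxs.map (fun i => pvAget nums i - pvAget nums (i - 1))) signs := by
  induction idxs generalizing signs with
  | nil => rfl
  | cons i rest ih =>
    simp only [List.map, leetcodeAltLoop, coll]
    split_ifs <;> simp [ih]

lemma coll_prefix (ds : List Int) : ∀ (signs s : List Bool), coll ds signs = some s → signs <+: s := by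
  induction ds with
  | nil =>
    intro signs s h
    simp only [coll] at h
    cases h
    exact List.prefix_refl _
  | cons d rest ih =>
    intro signs s h
    simp only [coll] at h
    split_ifs at h with h0 h1
    · exact (List.prefix_append signs _).trans (ih _ _ h)
    · exact ih _ _ h

lemma coll_append (l₁ l₂ : List Int) (signs : List Bool) :
    coll (l₁ ++ l₂) signs =
      match coll l₁ signs with
      | none => none
      | some s => coll l₂ s := by
  induction l₁ generalizing signs with
  | nil => rfl
  | cons d rest ih =>
    simp only [List.cons_append, coll]
    split_ifs <;> simp [ih]

lemma res_of_prefix_four (o : Option (List Bool)) (p : List Bool) (hp : p.length = 4)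
    (h : ∀ s, o = some s → p <+: s) : res o = false := by
  cases o with
  | none => rfl
  | some s =>
    have hpre := h s rfl
    have hlen : 4 ≤ s.length := hp ▸ hpre.length_le
    simp only [res, beq_eq_false_iff_ne]
    intro hs; rw [hs] at hlen; simp at hlen

lemma res_head_false (o : Option (List Bool)) (t : List Bool)
    (h : ∀ s, o = some s → (false :: t) <+: s) : res o = false := by
  cases o with
  | none => rfl
  | some s =>
    obtain ⟨u, hu⟩ := h s rfl
    simp only [res, beq_eq_false_iff_ne]
    intro hs; rw [hs] at hu; simp at hu

-- main invariant: A's three flag states correspond to B's run lists, with the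
-- final positive difference dlast still to be consumed by B
lemma minv (ds : List Int) (dlast : Int) (hl : 0 < dlast) :
    res (coll (ds ++ [dlast]) [true]) = mach ds 0 0 ∧
    res (coll (ds ++ [dlast]) [true, false]) = mach ds 1 0 ∧
    res (coll (ds ++ [dlast]) [true, false, true]) = mach ds 1 1 := by
  induction ds with
  | nil =>
    refine ⟨?_, ?_, ?_⟩ <;>
      · simp only [List.nil_append, coll, mach]
        rw [if_neg (by omega : ¬ dlast = 0)]
        simp [res, hl]
  | cons d rest ih =>
    obtain ⟨ih1, ih2, ih3⟩ := ih
    by_cases h0 : d = 0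
    · refine ⟨?_, ?_, ?_⟩ <;> simp [coll, mach, h0, res]
    rcases lt_trichotomy d 0 with hd | hd | hd
    · have hsd : decide (0 < d) = false := decide_eq_false (by omega)
      refine ⟨?_, ?_, ?_⟩ <;>
        simp only [List.cons_append, coll, mach, if_neg h0, hsd, if_pos hd,
          if_neg (by omega : ¬ (0:Int) < d), if_neg (by norm_num : ¬ (1:Int) = 0)]
      · rw [if_pos (by simp), if_pos (by norm_num)]
        simpa using ih2
      · rw [if_neg (by simp), if_pos (by norm_num)]
        exact ih2
      · rw [if_pos (by simp)]
        exact res_of_prefix_four _ [true, false, true, false] rfl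
          (fun s hs => coll_prefix _ _ _ (by simpa using hs))
    · omega
    · have hsd : decide (0 < d) = true := decide_eq_true hd
      refine ⟨?_, ?_, ?_⟩ <;>
        simp only [List.cons_append, coll, mach, if_neg h0, hsd, if_pos hd,
          if_neg (by omega : ¬ d < 0), if_neg (by norm_num : ¬ (1:Int) = 0)]
      · rw [if_neg (by simp), if_pos (by norm_num)]
        exact ih1
      · rw [if_pos (by simp), if_pos (by norm_num)]
        simpa using ih3
      · exact ih3

-- closing the run list on a non-positive last difference can never match [true, false, true]
lemma coll_last_nonpos (s : List Bool) (_hs : s ≠ []) (dlast : Int) (hl : dlast ≤ 0) :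
    res (coll [dlast] s) = false := by
  by_cases h0 : dlast = 0
  · simp [coll, h0, res]
  · have hsd : decide (0 < dlast) = false := decide_eq_false (by omega)
    simp only [coll, if_neg h0, hsd]
    split_ifs with h
    · simp only [res, beq_eq_false_iff_ne]
      intro hc
      have := congrArg List.getLast? hc
      simp at this
    · simp only [res, beq_eq_false_iff_ne]
      intro hc
      rw [hc] at h
      simp at h

lemma coll_cons_nil (dd : Int) (l : List Int) (hdd : ¬ dd = 0) :
    coll (dd :: l) [] = coll l [decide (0 < dd)] := by
  simp [coll, hdd]

lemma mach_eq_res (ds : List Int) (d1 dlast : Int) :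
    (if d1 ≤ 0 then false
     else if dlast ≤ 0 then false
     else mach ds 0 0) = res (coll (d1 :: (ds ++ [dlast])) []) := by
  by_cases h1 : d1 ≤ 0
  · rw [if_pos h1]
    by_cases h0 : d1 = 0
    · simp [coll, h0, res]
    · rw [coll_cons_nil _ _ h0, decide_eq_false (by omega : ¬ (0:Int) < d1)]
      exact (res_head_false _ [] (fun s hs => coll_prefix _ _ _ hs)).symm
  · rw [if_neg h1, coll_cons_nil _ _ (by omega), decide_eq_true (by omega : (0:Int) < d1)]
    by_cases h2 : dlast ≤ 0
    · rw [if_pos h2, coll_append]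
      cases hc : coll ds [true] with
      | none => rfl
      | some s =>
        have hs : s ≠ [] := by
          have := coll_prefix _ _ _ hc
          intro h
          rw [h] at this
          simp at this
        exact (coll_last_nonpos s hs dlast h2).symm
    · rw [if_neg h2]
      exact ((minv ds dlast (by omega)).1).symm

-- negative-index accesses equal the corresponding nonnegative ones under Pre_
lemma pvAget_neg (nums : List Int) (k : Nat) (hk : 0 < k) (hlen : k ≤ nums.length) :
    pvAget nums (-(k : Int)) = pvAget nums ((nums.length : Int) - k) := by
  unfold pvAget
  rw [PySem.List.pyGetD_neg_natCast nums k 0 hk hlen,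
    PySem.List.pyGetD_eq_getElem nums 0 (by omega) (by omega)]
  congr 1
  omega

lemma res_match (o : Option (List Bool)) :
    (match o with
     | none => false
     | some signs => signs == [true, false, true]) = res o := by
  cases o <;> rfl

theorem leetcode_eq (nums : List Int) (h : 2 ≤ nums.length) :
    leetcode nums = leetcode_alt nums := by
  simp only [leetcode, leetcode_alt]
  rw [loopA_eq, loopB_eq, res_match]
  set f : Int → Int := fun i => pvAget nums i - pvAget nums (i - 1) with hf
  have e1 : pvAget nums (-1) = pvAget nums ((nums.length : Int) - 1) := by
    simpa using pvAget_neg nums 1 (by omega) (by omega)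
  have e2 : pvAget nums (-2) = pvAget nums ((nums.length : Int) - 2) := by
    simpa using pvAget_neg nums 2 (by omega) (by omega)
  by_cases h3 : 3 ≤ nums.length
  · have hrange : PySem.List.pyRange 1 (nums.length : Int) 1 =
        1 :: (PySem.List.pyRange 2 ((nums.length : Int) - 1) 1 ++ [(nums.length : Int) - 1]) := by
      have hsr := PySem.List.pyRange_one_succ_right
        (a := 1) (b := (nums.length : Int) - 1) (by omega)
      rw [show ((nums.length : Int) - 1) + 1 = (nums.length : Int) from by ring] at hsr
      rw [hsr, PySem.List.pyRange_one_cons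
        (a := 1) (b := (nums.length : Int) - 1) (by omega)]
      norm_num
    have hmap : (PySem.List.pyRange 1 (nums.length : Int) 1).map f
        = (pvAget nums 1 - pvAget nums 0) ::
            (((PySem.List.pyRange 2 ((nums.length : Int) - 1) 1).map f)
              ++ [pvAget nums (-1) - pvAget nums (-2)]) := by
      rw [hrange]
      simp only [List.map_cons, List.map_append, List.map_nil, hf]
      norm_num
      rw [e1, e2]
      congr 1
      ring
    rw [hmap]
    simp only [show (pvAget nums 1 ≤ pvAget nums 0) ↔ (pvAget nums 1 - pvAget nums 0 ≤ 0) from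
        by constructor <;> intro <;> omega,
      show (pvAget nums (-1) ≤ pvAget nums (-2)) ↔
          (pvAget nums (-1) - pvAget nums (-2) ≤ 0) from
        by constructor <;> intro <;> omega]
    rw [mach_eq_res]
  · -- nums.length = 2: A returns false (empty loop, point1_flag = 0) and B's single
    -- sign run can never equal [true, false, true]
    have hA : PySem.List.pyRange 2 ((nums.length : Int) - 1) 1 = [] := by
      rw [PySem.List.pyRange_one_eq_nil (by omega)]
    have hB : PySem.List.pyRange 1 (nums.length : Int) 1 = [1] := by
      have hsplit : (nums.length : Int) = 1 + 1 := by omega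
      rw [hsplit, PySem.List.pyRange_one_singleton]
    rw [hA, hB]
    simp only [List.map_nil, List.map_cons, mach, coll]
    split_ifs <;> simp [res]

-- ===== VERDICT (by name: the statement is the Claim_ definition above) =====
theorem leetcode_spec : Claim_equal_leetcode := by
  intro nums _hdom hpre
  unfold Spec_leetcode
  exact leetcode_eq nums hpre
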